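-- pv_equiv track=rewrite | github.com/blank54/navi | run/update.py | reorder_activity
-- ===== SOURCE A (Python) =====
-- def reorder_activity(local_schedule, activity_code, conflict_items):
--     local_schedule_updated = {}
--
--     current = [day for day in local_schedule.keys() if local_schedule[day] == activity_code][0]
--     move_to = max([day for day, _ in conflict_items])
--
--     for day in range(0, len(local_schedule), 1):
--         if day < current or day > move_to:
--             local_schedule_updated[day] = local_schedule[day]
--         elif day == current:
--             local_schedule_updated[move_to] = local_schedule[day]
--         else:
--             local_schedule_updated[day-1] = local_schedule[day]
--
--     return {d: a for d, a in sorted(local_schedule_updated.items(), key=lambda x:x[0])}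
-- ===== SOURCE B (Python) =====
-- def reorder_activity(local_schedule, activity_code, conflict_items):
--     current = next(day for day, act in local_schedule.items() if act == activity_code)
--     move_to = max(day for day, _ in conflict_items)
--     activities = [local_schedule[day] for day in range(len(local_schedule))]
--     if move_to > current:
--         moved = activities.pop(current)
--         activities.insert(move_to, moved)
--     return {day: act for day, act in enumerate(activities)}
-- ===== Notes on version B (the rewrite author's own statement) =====
-- stated objective: simpler
-- what changed: B materializes the schedule values as a plain list, performs the move with a single pop/insert (only when the target day is after the current one, matching A's no-move-backward rule), and rebuilds the dict with enumerate, replacing A's three-way re-keyed dict surgery plus explicit sort.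
-- intended difference: On conflict items naming a day >= len(schedule), A returns a dict still keyed by that out-of-range day and with no entry for day len-1, while B re-indexes the moved schedule to contiguous days 0..n-1, which is the intended shape of a schedule. — e.g. on reorder_activity([(0, "A"), (1, "X")], "X", [(5, "c")]): A returns [(0, "A"), (5, "X")], B returns [(0, "A"), (1, "X")]
import Mathlib
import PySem

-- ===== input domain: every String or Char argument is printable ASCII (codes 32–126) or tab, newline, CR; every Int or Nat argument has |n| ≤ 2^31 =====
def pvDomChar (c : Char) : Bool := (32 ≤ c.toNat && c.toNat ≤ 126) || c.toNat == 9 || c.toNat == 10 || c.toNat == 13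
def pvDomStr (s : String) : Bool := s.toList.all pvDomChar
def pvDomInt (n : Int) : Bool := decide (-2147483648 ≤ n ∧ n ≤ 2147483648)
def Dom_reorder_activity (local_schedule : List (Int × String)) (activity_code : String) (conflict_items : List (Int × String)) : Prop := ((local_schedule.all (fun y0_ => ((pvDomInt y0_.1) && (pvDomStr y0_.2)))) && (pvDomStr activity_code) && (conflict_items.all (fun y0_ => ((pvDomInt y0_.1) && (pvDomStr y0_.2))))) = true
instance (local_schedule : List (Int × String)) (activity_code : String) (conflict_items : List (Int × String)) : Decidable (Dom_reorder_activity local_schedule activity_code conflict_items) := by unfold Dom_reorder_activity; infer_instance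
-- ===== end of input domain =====

-- ===== PORT A =====
-- B replaces A's keyed dict surgery + sort by a list pop/insert + enumerate (objective: simpler).
-- Port note: `local_schedule[day]` is ported as `d.getD day ""`; the default is reachable only on
-- inputs where Python raises KeyError, which Pre_ excludes (keys must be exactly 0..n-1).
def reorder_activity (local_schedule : List (Int × String)) (activity_code : String) (conflict_items : List (Int × String)) : List (Int × String) :=
  let d := PySem.Dict.mk local_schedule
  match d.keys.filter (fun day => d.get? day == some activity_code) with
  | [] => []            -- `[...][0]` raises IndexError: excluded by Pre_
  | current :: _ =>
    match PySem.List.max? (conflict_items.map Prod.fst) (fun x => x) with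
    | none => []        -- `max([])` raises ValueError: excluded by Pre_
    | some move_to =>
      let upd := (PySem.List.pyRange 0 (d.size : Int) 1).foldl
        (fun u day =>
          if day < current ∨ day > move_to then u.insert day (d.getD day "")
          else if day = current then u.insert move_to (d.getD day "")
          else u.insert (day - 1) (d.getD day "")) PySem.Dict.empty
      -- `{d: a for d, a in sorted(...items(), key=...)}`: dict keys are distinct, so the dict IS the sorted item list
      PySem.List.sorted upd.items (fun x => x.1) false

-- ===== PORT B =====
def reorder_activity_alt (local_schedule : List (Int × String)) (activity_code : String) (conflict_items : List (Int × String)) : List (Int × String) :=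
  match local_schedule.find? (fun p => p.2 == activity_code) with
  | none => []          -- `next(...)` raises StopIteration: excluded by Pre_
  | some q =>
    let current := q.1
    match PySem.List.max? (conflict_items.map Prod.fst) (fun x => x) with
    | none => []        -- `max` on empty raises ValueError: excluded by Pre_
    | some move_to =>
      let d := PySem.Dict.mk local_schedule
      let activities := (PySem.List.pyRange 0 (d.size : Int) 1).map (fun day => d.getD day "")
      let acts :=
        if current < move_to then
          match PySem.List.pop? activities current with
          | none => []  -- unreachable: 0 ≤ current < len(activities)
          | some (moved, rest) => PySem.List.insert rest move_to moved
        else activities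
      -- `{day: a for day, a in enumerate(acts)}`: enumerate keys are distinct, so the dict IS this list
      PySem.List.enumerate acts 0

-- ===== PRECONDITION & SPEC =====
-- Pre_ excludes exactly the inputs where A raises: schedule keys not exactly 0..n-1 (KeyError in the
-- loop), activity_code not among the values (IndexError on [...][0]), empty conflict_items (ValueError
-- in max()).
def Pre_reorder_activity (local_schedule : List (Int × String)) (activity_code : String) (conflict_items : List (Int × String)) : Prop :=
  (local_schedule.map Prod.fst).Perm (PySem.List.pyRange 0 (local_schedule.length : Int) 1)
  ∧ (∃ p ∈ local_schedule, p.2 = activity_code)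
  ∧ conflict_items ≠ []
instance (local_schedule : List (Int × String)) (activity_code : String) (conflict_items : List (Int × String)) : Decidable (Pre_reorder_activity local_schedule activity_code conflict_items) := by unfold Pre_reorder_activity; infer_instance

def pvWitness_reorder_activity : (List (Int × String)) × String × (List (Int × String)) :=
  ([(0, "A"), (1, "X"), (2, "B")], "X", [(2, "c")])

-- On conflict items naming a day ≥ len(schedule), A returns a dict still keyed by that out-of-range
-- day (and with no entry for day len-1), while B re-indexes the moved schedule to contiguous days
-- 0..n-1 — the intended shape of a schedule.
def D_reorder_activity (local_schedule : List (Int × String)) (activity_code : String) (conflict_items : List (Int × String)) : Prop :=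
  ∃ p ∈ conflict_items, (local_schedule.length : Int) ≤ p.1
instance (local_schedule : List (Int × String)) (activity_code : String) (conflict_items : List (Int × String)) : Decidable (D_reorder_activity local_schedule activity_code conflict_items) := by unfold D_reorder_activity; infer_instance

def Spec_reorder_activity (local_schedule : List (Int × String)) (activity_code : String) (conflict_items : List (Int × String)) (out : List (Int × String)) : Prop := ¬ D_reorder_activity local_schedule activity_code conflict_items → out = reorder_activity_alt local_schedule activity_code conflict_items
instance (local_schedule : List (Int × String)) (activity_code : String) (conflict_items : List (Int × String)) (out : List (Int × String)) : Decidable (Spec_reorder_activity local_schedule activity_code conflict_items out) := by unfold Spec_reorder_activity; infer_instance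

def pvDiffWitness_reorder_activity : (List (Int × String)) × String × (List (Int × String)) :=
  ([(0, "A"), (1, "X")], "X", [(5, "c")])

def pvDiffWitnessOut_reorder_activity : (List (Int × String)) × (List (Int × String)) :=
  ([(0, "A"), (5, "X")], [(0, "A"), (1, "X")])

-- ===== CLAIM (what is proved, stated in full; the proofs are below) =====
def Claim_unchanged_reorder_activity : Prop := ∀ (local_schedule : List (Int × String)) (activity_code : String) (conflict_items : List (Int × String)), Dom_reorder_activity local_schedule activity_code conflict_items → Pre_reorder_activity local_schedule activity_code conflict_items → Spec_reorder_activity local_schedule activity_code conflict_items (reorder_activity local_schedule activity_code conflict_items)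
def Claim_changed_reorder_activity : Prop := Dom_reorder_activity (pvDiffWitness_reorder_activity.1) (pvDiffWitness_reorder_activity.2.1) (pvDiffWitness_reorder_activity.2.2) ∧ Pre_reorder_activity (pvDiffWitness_reorder_activity.1) (pvDiffWitness_reorder_activity.2.1) (pvDiffWitness_reorder_activity.2.2) ∧ D_reorder_activity (pvDiffWitness_reorder_activity.1) (pvDiffWitness_reorder_activity.2.1) (pvDiffWitness_reorder_activity.2.2) ∧ reorder_activity (pvDiffWitness_reorder_activity.1) (pvDiffWitness_reorder_activity.2.1) (pvDiffWitness_reorder_activity.2.2) = pvDiffWitnessOut_reorder_activity.1 ∧ reorder_activity_alt (pvDiffWitness_reorder_activity.1) (pvDiffWitness_reorder_activity.2.1) (pvDiffWitness_reorder_activity.2.2) = pvDiffWitnessOut_reorder_activity.2 ∧ pvDiffWitnessOut_reorder_activity.1 ≠ pvDiffWitnessOut_reorder_activity.2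

-- ===== LEMMAS AND PROOFS =====

-- Python list.insert at a nonnegative in-range index is take/drop splicing
theorem pv_insert_natCast {α : Type} (xs : List α) (n : Nat) (v : α) (h : n ≤ xs.length) :
    PySem.List.insert xs (n : Int) v = xs.take n ++ v :: xs.drop n := by
  simp only [PySem.List.insert, PySem.List.sliceIndices]
  have h1 : ¬ ((n : Int) < 0) := by omega
  have h2 : (min (n : Int) (xs.length : Int)).toNat = n := by omega
  simp [h1, h2]

-- enumerate over a mapped range is the graph of the function
theorem pv_enum0 {α : Type} (n : Nat) (u : Nat → α) :
    PySem.List.enumerate ((List.range n).map u) 0 = (List.range n).map (fun (i : Nat) => ((i : Int), u i)) := by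
  apply List.ext_getElem
  · simp [PySem.List.length_enumerate]
  · intro k h1 h2
    simp [PySem.List.getElem_enumerate]

-- range b splits at a ≤ b
theorem pv_range_split (a b : Nat) (h : a ≤ b) :
    List.range b = List.range a ++ (List.range (b - a)).map (fun j => a + j) := by
  calc List.range b = List.range (a + (b - a)) := congrArg List.range (by omega)
    _ = _ := List.range_add

-- enumerate over a mapped range with an arbitrary start
theorem pv_enum {α : Type} (k : Nat) (f : Nat → α) (s : Int) :
    PySem.List.enumerate ((List.range k).map f) s
      = (List.range k).map (fun (j : Nat) => (s + (j : Int), f j)) := by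
  apply List.ext_getElem
  · simp [PySem.List.length_enumerate]
  · intro i h1 h2
    simp [PySem.List.getElem_enumerate]

-- ===== VERDICT =====
theorem reorder_activity_spec : Claim_unchanged_reorder_activity := by
  intro ls code conf _hdom hpre
  obtain ⟨hperm, hex, hconf⟩ := hpre
  unfold Spec_reorder_activity
  intro hnD
  have hlt : ∀ p ∈ conf, p.1 < (ls.length : Int) := by
    intro p hp
    by_contra hle
    exact hnD ⟨p, hp, by omega⟩
  simp only [reorder_activity, reorder_activity_alt]
  set n := ls.length with hn
  set d : PySem.Dict Int String := PySem.Dict.mk ls with hd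
  have hitems : d.items = ls := rfl
  have hsize : d.size = n := rfl
  have hkeys : d.keys = ls.map Prod.fst := rfl
  have hpy : PySem.List.pyRange 0 (n : Int) 1 = (List.range n).map (fun (k : Nat) => (k : Int)) :=
    PySem.List.pyRange_zero_natCast n
  have hnd : (ls.map Prod.fst).Nodup := by
    rw [List.Perm.nodup_iff hperm, hpy]
    exact List.Nodup.map (fun a b h => by exact_mod_cast h) List.nodup_range
  obtain ⟨q, hfind⟩ : ∃ q, ls.find? (fun p => p.2 == code) = some q := by
    have h1 : (ls.find? (fun p => p.2 == code)).isSome = true :=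
      List.find?_isSome.mpr (by obtain ⟨p, hp, h2⟩ := hex; exact ⟨p, hp, by simp [h2]⟩)
    exact ⟨(ls.find? (fun p => p.2 == code)).get h1, (Option.some_get h1).symm⟩
  have hqmem : q ∈ ls := List.mem_of_find?_eq_some hfind
  have hq2 : q.2 = code := by simpa using List.find?_some hfind
  obtain ⟨t, hq⟩ : ∃ t, ls.filter (fun p => p.2 == code) = q :: t := by
    have hh := List.head?_filter (p := fun p => p.2 == code) (l := ls)
    rw [hfind] at hh
    cases hf : ls.filter (fun p => p.2 == code) with
    | nil => rw [hf] at hh; simp at hh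
    | cons a t =>
      rw [hf] at hh
      simp only [List.head?_cons, Option.some.injEq] at hh
      exact ⟨t, by rw [hh]⟩
  have hmemk : ∀ k : Int, k ∈ ls.map Prod.fst ↔ ∃ i : Nat, i < n ∧ k = (i : Int) := by
    intro k
    rw [hperm.mem_iff, hpy]
    simp only [List.mem_map, List.mem_range]
    constructor <;> rintro ⟨i, h1, h2⟩ <;> exact ⟨i, h1, h2.symm⟩
  have hget : ∀ p ∈ ls, d.get? p.1 = some p.2 := by
    intro p hp
    exact PySem.Dict.get?_of_mem_items _ (by rw [hitems]; simpa using hp) (by rw [hkeys]; exact hnd)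
  set u : Nat → String := fun i => d.getD (i : Int) "" with hu
  have hpair : ∀ i : Nat, i < n → ((i : Int), u i) ∈ ls := by
    intro i hi
    have hk : ((i : Int)) ∈ ls.map Prod.fst := (hmemk _).mpr ⟨i, hi, rfl⟩
    obtain ⟨p, hp, hp1⟩ := List.mem_map.mp hk
    have hgd : d.getD (i : Int) "" = p.2 := by
      rw [← hp1]; exact PySem.Dict.getD_of_get?_eq_some _ _ (hget p hp)
    have hep : ((i : Int), u i) = p := by
      show ((i : Int), d.getD (i : Int) "") = p
      rw [hgd, ← hp1]
    rw [hep]; exact hp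
  obtain ⟨cn, hcn, hc⟩ : ∃ i : Nat, i < n ∧ q.1 = (i : Int) :=
    (hmemk q.1).mp (List.mem_map_of_mem hqmem)
  have hucn : u cn = code := by
    have hgd : d.getD q.1 "" = q.2 := PySem.Dict.getD_of_get?_eq_some _ _ (hget q hqmem)
    show d.getD (cn : Int) "" = code
    rw [← hc, hgd, hq2]
  -- A's `current` is q.1
  have hfilt : d.keys.filter (fun day => d.get? day == some code) = q.1 :: t.map Prod.fst := by
    rw [hkeys, List.filter_map]
    have hcg : ls.filter ((fun day => d.get? day == some code) ∘ Prod.fst)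
        = ls.filter (fun p => p.2 == code) := by
      apply List.filter_congr
      intro p hp
      simp [Function.comp, hget p hp]
    rw [hcg, hq]; rfl
  -- `move_to`
  obtain ⟨m, hmax⟩ : ∃ m, PySem.List.max? (conf.map Prod.fst) (fun x => x) = some m := by
    cases h : PySem.List.max? (conf.map Prod.fst) (fun x => x) with
    | none =>
      rw [PySem.List.max?_eq_none_iff] at h
      exact absurd (List.map_eq_nil_iff.mp h) hconf
    | some m => exact ⟨m, rfl⟩
  have hmlt : m < (n : Int) := by
    obtain ⟨p, hp, hp1⟩ := List.mem_map.mp (PySem.List.max?_mem hmax)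
    rw [← hp1]; exact hlt p hp
  have hmle : ∀ p ∈ conf, p.1 ≤ m := by
    intro p hp
    exact PySem.List.max?_isMax hmax p.1 (List.mem_map_of_mem hp)
  -- B's activities list
  have hacts : (PySem.List.pyRange 0 ((d.size : Nat) : Int) 1).map (fun day => d.getD day "")
      = (List.range n).map u := by
    rw [hsize, hpy, List.map_map]
    exact List.map_congr_left (fun i _ => rfl)
  rw [hfilt, hfind, hmax, hacts]
  simp only
  rw [hsize, hpy, List.foldl_map, hc]
  have hndc : ((List.range n).map (fun (i : Nat) => (i : Int))).Nodup :=
    List.Nodup.map (fun a b h => by exact_mod_cast h) List.nodup_range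
  have hfresh0 : ∀ a ∈ List.range n, (PySem.Dict.empty : PySem.Dict Int String).contains ((a : Nat) : Int) = false :=
    fun a _ => PySem.Dict.contains_empty _
  by_cases hcm : (cn : Int) < m
  · -- current < move_to: A re-keys (shift block left, activity at key m); B pops and re-inserts
    have hmm : m = (m.toNat : Int) := by omega
    set mn := m.toNat with hmndef
    have hcnmn : cn < mn := by omega
    have hmnn : mn < n := by omega
    -- the four canonical segments of the result
    set S1 : List (Int × String) := (List.range cn).map (fun (j : Nat) => ((j : Int), u j)) with hS1
    set S3 : List (Int × String) := (List.range (mn - cn)).map (fun (j : Nat) => ((cn : Int) + (j : Int), u (cn+1+j))) with hS3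
    set S4 : List (Int × String) := (List.range (n - 1 - mn)).map (fun (j : Nat) => ((mn : Int) + 1 + (j : Int), u (mn+1+j))) with hS4
    -- B side: pop current, insert at mn
    rw [if_pos hcm]
    have hlen : cn < ((List.range n).map u).length := by simpa using hcn
    rw [PySem.List.pop?_natCast _ cn hlen]
    simp only
    have hgetcn : ((List.range n).map u)[cn]'hlen = u cn := by simp
    have herase : ((List.range n).map u).eraseIdx cn
        = (List.range cn).map u ++ (List.range (n - (cn+1))).map (fun j => u (cn+1+j)) := by
      rw [List.eraseIdx_map, List.eraseIdx_eq_take_drop_succ, List.take_range,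
          pv_range_split (cn+1) n (by omega), List.drop_append,
          List.drop_of_length_le (by simp)]
      simp [Nat.min_eq_left hcn.le, Function.comp]
    have hinsert : PySem.List.insert
        ((List.range cn).map u ++ (List.range (n - (cn+1))).map (fun j => u (cn+1+j))) m (u cn)
        = (List.range cn).map u ++ ((List.range (mn - cn)).map (fun j => u (cn+1+j))
            ++ u cn :: (List.range (n - 1 - mn)).map (fun j => u (mn+1+j))) := by
      rw [hmm, pv_insert_natCast _ mn _ (by simp; omega)]
      rw [List.take_append, List.drop_append,
          List.take_of_length_le (by simp; omega), List.drop_of_length_le (by simp; omega)]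
      rw [← List.map_take, ← List.map_drop, List.take_range]
      simp only [List.length_map, List.length_range]
      rw [pv_range_split (mn - cn) (n - (cn+1)) (by omega), List.drop_append,
          List.drop_of_length_le (by simp)]
      simp only [List.length_range, Nat.sub_self, List.drop_zero, List.nil_append, List.map_map,
        Nat.min_eq_left (show mn - cn ≤ n - (cn+1) by omega), List.append_assoc]
      rw [show n - (cn+1) - (mn - cn) = n - 1 - mn by omega]
      congr 2
      congr 1
      exact List.map_congr_left (fun j _ => by
        have h : cn + 1 + (mn - cn + j) = mn + 1 + j := by omega
        simp [Function.comp, h])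
    have hBfinal : PySem.List.enumerate
        ((List.range cn).map u ++ ((List.range (mn - cn)).map (fun j => u (cn+1+j))
          ++ u cn :: (List.range (n - 1 - mn)).map (fun j => u (mn+1+j)))) 0
        = S1 ++ (S3 ++ (((mn : Int), u cn) :: S4)) := by
      rw [PySem.List.enumerate_append, PySem.List.enumerate_append, PySem.List.enumerate_cons,
          pv_enum, pv_enum, pv_enum, hS1, hS3, hS4]
      simp only [List.length_map, List.length_range, zero_add]
      congr 1
      congr 1
      congr 1
      · have h : (cn : Int) + ((mn - cn : Nat) : Int) = (mn : Int) := by omega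
        rw [h]
      · exact List.map_congr_left (fun j _ => by
          have h : (cn : Int) + ((mn - cn : Nat) : Int) + 1 + (j : Int) = (mn : Int) + 1 + (j : Int) := by omega
          simp [h])
    rw [List.getElem_map, List.getElem_range, herase, hinsert, hBfinal]
    -- A side: the loop inserts fresh keys with values u i
    have hbody : ∀ (acc : PySem.Dict Int String), ∀ i ∈ List.range n,
        (if (i : Int) < (cn : Int) ∨ (i : Int) > m then acc.insert (i : Int) (d.getD (i : Int) "")
         else if (i : Int) = (cn : Int) then acc.insert m (d.getD (i : Int) "")
         else acc.insert ((i : Int) - 1) (d.getD (i : Int) ""))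
        = acc.insert (if i < cn ∨ mn < i then (i : Int) else if i = cn then (mn : Int) else (i : Int) - 1) (u i) := by
      intro acc i _
      by_cases h1 : (i : Int) < (cn : Int) ∨ (i : Int) > m
      · have h1' : i < cn ∨ mn < i := by omega
        rw [if_pos h1, if_pos h1']
      · push Not at h1
        have h1' : ¬ (i < cn ∨ mn < i) := by omega
        rw [if_neg (by push Not; exact h1), if_neg h1']
        by_cases h2 : (i : Int) = (cn : Int)
        · have h2' : i = cn := by omega
          rw [if_pos h2, if_pos h2', hmm]
        · have h2' : ¬ i = cn := by omega
          rw [if_neg h2, if_neg h2']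
    rw [PySem.List.foldl_congr_mem (List.range n) _
      (fun acc (i : Nat) => acc.insert (if i < cn ∨ mn < i then (i : Int) else if i = cn then (mn : Int) else (i : Int) - 1) (u i))
      _ hbody]
    have hndg : ((List.range n).map (fun (i : Nat) => if i < cn ∨ mn < i then (i : Int) else if i = cn then (mn : Int) else (i : Int) - 1)).Nodup := by
      apply List.Nodup.map_on ?_ List.nodup_range
      intro a _ b _ hab
      split_ifs at hab <;> omega
    rw [PySem.Dict.items_foldl_insert_fresh (List.range n) _ u PySem.Dict.empty
      (fun a _ => PySem.Dict.contains_empty _) hndg]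
    have hLseg : (List.range n).map (fun (i : Nat) =>
        ((if i < cn ∨ mn < i then (i : Int) else if i = cn then (mn : Int) else (i : Int) - 1), u i))
        = (S1 ++ [((mn : Int), u cn)]) ++ (S3 ++ S4) := by
      have hsplit3 : List.range (n - (cn+1))
          = List.range (mn - cn) ++ (List.range (n - 1 - mn)).map (fun j => (mn - cn) + j) := by
        have h := pv_range_split (mn - cn) (n - (cn+1)) (by omega)
        rwa [show n - (cn+1) - (mn - cn) = n - 1 - mn by omega] at h
      rw [pv_range_split (cn+1) n (by omega), List.range_succ, hsplit3, hS1, hS3, hS4]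
      simp only [List.map_append, List.map_map, List.append_assoc, List.map_cons, List.map_nil]
      congr 1
      · exact List.map_congr_left (fun i hi => by
          have hi' := List.mem_range.mp hi
          rw [if_pos (Or.inl hi')])
      congr 1
      · have hx : ¬ mn < cn := by omega
        simp [hx]
      congr 1
      · exact List.map_congr_left (fun j hj => by
          have hj' := List.mem_range.mp hj
          have c1 : ¬ (cn + 1 + j < cn ∨ mn < cn + 1 + j) := by omega
          have c2 : ¬ (cn + 1 + j = cn) := by omega
          simp [Function.comp, c1, c2]
          omega)
      · exact List.map_congr_left (fun j _ => by
          have c1 : cn + 1 + (mn - cn + j) < cn ∨ mn < cn + 1 + (mn - cn + j) := by omega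
          have h2 : cn + 1 + (mn - cn + j) = mn + 1 + j := by omega
          simp [Function.comp, h2]
          omega)
    rw [hLseg]
    rw [show ((PySem.Dict.empty : PySem.Dict Int String).items) = [] from rfl, List.nil_append]
    apply PySem.List.sorted_eq_of_perm_of_pairwise_lt
    · -- the target is the loop's item list with the singleton moved across S3
      have e1 : S1 ++ (S3 ++ (((mn : Int), u cn) :: S4)) = S1 ++ ((S3 ++ [((mn : Int), u cn)]) ++ S4) := by simp
      have e2 : S1 ++ (([((mn : Int), u cn)] ++ S3) ++ S4) = (S1 ++ [((mn : Int), u cn)]) ++ (S3 ++ S4) := by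
        simp [List.append_assoc]
      rw [e1, ← e2]
      exact List.Perm.append_left S1 (List.Perm.append_right S4 List.perm_append_comm)
    · -- keys strictly increase along the target
      rw [hS1, hS3, hS4]
      simp only [List.pairwise_append, List.pairwise_cons, List.pairwise_map, List.mem_append,
        List.mem_map, List.mem_range, List.mem_cons]
      refine ⟨?_, ⟨?_, ⟨?_, ?_⟩, ?_⟩, ?_⟩
      · exact List.pairwise_lt_range.imp (fun h => by exact_mod_cast h)
      · exact List.pairwise_lt_range.imp (fun h => by omega)
      · rintro a' ⟨j, hj, rfl⟩
        simp
        omega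
      · exact List.pairwise_lt_range.imp (fun h => by omega)
      · rintro a ⟨j, hj, rfl⟩ b hb
        rcases hb with rfl | ⟨k, hk, rfl⟩ <;> simp <;> omega
      · rintro a ⟨j, hj, rfl⟩ b hb
        rcases hb with ⟨k, hk, rfl⟩ | rfl | ⟨k, hk, rfl⟩ <;> simp <;> omega
  · -- m ≤ current: A's loop copies every entry and B does not move anything
    rw [if_neg hcm]
    have hmc : m ≤ (cn : Int) := not_lt.mp hcm
    -- A's loop body always inserts key ↑i with value u i
    have hbody : ∀ (acc : PySem.Dict Int String), ∀ i ∈ List.range n,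
        (if (i : Int) < (cn : Int) ∨ (i : Int) > m then acc.insert (i : Int) (d.getD (i : Int) "")
         else if (i : Int) = (cn : Int) then acc.insert m (d.getD (i : Int) "")
         else acc.insert ((i : Int) - 1) (d.getD (i : Int) ""))
        = acc.insert ((i : Int)) (u i) := by
      intro acc i _
      by_cases h1 : (i : Int) < (cn : Int) ∨ (i : Int) > m
      · rw [if_pos h1]
      · push Not at h1
        have h2 : (i : Int) = (cn : Int) := by omega
        rw [if_neg (by push Not; exact h1), if_pos h2]
        have h3 : m = (i : Int) := by omega
        rw [h3]
    rw [PySem.List.foldl_congr_mem (List.range n) _ (fun acc i => acc.insert ((i : Nat) : Int) (u i)) _ (by intro acc i hi; exact hbody acc i hi)]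
    rw [PySem.Dict.items_foldl_insert_fresh (List.range n) (fun (i : Nat) => (i : Int)) u PySem.Dict.empty hfresh0 hndc]
    rw [pv_enum0]
    apply PySem.List.sorted_eq_of_perm_of_pairwise_lt
    · simp only [PySem.Dict.empty, List.nil_append]
      exact List.Perm.refl _
    · rw [List.pairwise_map]
      exact List.pairwise_lt_range.imp (fun h => by simpa using h)

theorem reorder_activity_changed : Claim_changed_reorder_activity := by
  unfold Claim_changed_reorder_activity
  decide
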